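-- pv_equiv track=rewrite | github.com/rpask00/codeforces_py | software_mansion.py | calculate
-- ===== SOURCE A (Python) =====
-- def calculate(A, B, n):
--     counts = [0] * (n + 1)
--
--     for b in B:
--         counts[b] += 1
--
--     is_prime = [False, False] + [True] * (n - 1)
--
--     p = 2
--     while p * p <= n:
--         if is_prime[p]:
--             for i in range(p * p, n + 1, p):
--                 is_prime[i] = False
--         p += 1
--
--     return [a for a in A if not is_prime[counts[a]]]
-- ===== SOURCE B (Python) =====
-- def calculate(A, B, n):
--     counts = [0] * (n + 1)
--
--     for b in B:
--         counts[b] += 1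
--
--     def is_prime(k):
--         if k < 2:
--             return False
--         d = 2
--         while d * d <= k:
--             if k % d == 0:
--                 return False
--             d += 1
--         return True
--
--     return [a for a in A if not is_prime(counts[a])]
-- ===== Notes on version B (the rewrite author's own statement) =====
-- stated objective: simpler
-- what changed: The precomputed Sieve-of-Eratosthenes table over [0, n] is replaced by an on-demand trial-division primality test applied to each element's count; the counts list is built exactly as in A.
import Mathlib
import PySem

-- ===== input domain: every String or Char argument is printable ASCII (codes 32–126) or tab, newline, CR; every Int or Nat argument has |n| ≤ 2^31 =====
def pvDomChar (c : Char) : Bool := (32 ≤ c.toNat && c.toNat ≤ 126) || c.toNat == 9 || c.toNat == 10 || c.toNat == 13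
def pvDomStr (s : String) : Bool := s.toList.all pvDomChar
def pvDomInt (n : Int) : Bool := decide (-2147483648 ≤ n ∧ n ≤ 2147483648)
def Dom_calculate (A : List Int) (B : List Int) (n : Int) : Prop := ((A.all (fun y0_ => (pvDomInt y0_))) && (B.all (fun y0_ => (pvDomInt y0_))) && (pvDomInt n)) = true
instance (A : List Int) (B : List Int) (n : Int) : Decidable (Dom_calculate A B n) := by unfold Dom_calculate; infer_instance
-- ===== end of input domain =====

-- B replaces A's precomputed Sieve-of-Eratosthenes table with an on-demand trial-division
-- primality test on each element's count; the counts list is built exactly as in A.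

-- ===== PORT A =====

-- 'counts[b] += 1' over B (this loop is literally shared by both Pythons)
def buildCounts (B : List Int) (cs : List Int) : List Int :=
  B.foldl (fun cs b => PySem.List.pySetD cs b (PySem.List.pyGetD cs b 0 + 1)) cs

-- inner 'for i in range(p*p, n+1, p): is_prime[i] = False'
def markMultiples (n p : Int) (ip : List Bool) : List Bool :=
  (PySem.List.pyRange (p * p) (n + 1) p).foldl (fun t i => PySem.List.pySetD t i false) ip

-- 'p = 2; while p * p <= n: …; p += 1'  (fuel = n-1 bounds the iteration count; once
-- p*p > n the loop exits, and fuel 0 implies p > n, so the fuel never cuts the loop short)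
def sieveLoop : Nat → Int → List Bool → Int → List Bool
  | 0, _, ip, _ => ip
  | fuel + 1, n, ip, p =>
    if p * p ≤ n then
      sieveLoop fuel n (if PySem.List.pyGetD ip p false then markMultiples n p ip else ip) (p + 1)
    else ip

def calculate (A : List Int) (B : List Int) (n : Int) : List Int :=
  let counts := buildCounts B (List.replicate (n + 1).toNat 0)
  let ip := sieveLoop (n - 1).toNat n ([false, false] ++ List.replicate (n - 1).toNat true) 2
  A.filter (fun a => !(PySem.List.pyGetD ip (PySem.List.pyGetD counts a 0) false))

-- ===== PORT B =====

-- 'while d * d <= k: if k % d == 0: return False; d += 1' — d starts at 2 and only grows,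
-- so d > 0 and Lean's % coincides with Python's % here (exact)
-- fuel = k-1 bounds the iteration count; once d*d > k the loop exits, and fuel 0 implies
-- d > k, so the fuel never cuts the loop short
def tdLoop : Nat → Int → Int → Bool
  | 0, _, _ => true
  | fuel + 1, k, d =>
    if d * d ≤ k then
      if k % d = 0 then false else tdLoop fuel k (d + 1)
    else true

def isPrimeTD (k : Int) : Bool :=
  if k < 2 then false else tdLoop (k - 1).toNat k 2

def calculate_alt (A : List Int) (B : List Int) (n : Int) : List Int :=
  let counts := buildCounts B (List.replicate (n + 1).toNat 0)
  A.filter (fun a => !isPrimeTD (PySem.List.pyGetD counts a 0))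

-- ===== PRECONDITION & SPEC =====

-- pvSlot n x: the cell that 'xs[x]' denotes in a list of length n+1, with Python's negative wraparound
def pvSlot (n x : Int) : Int := if x < 0 then x + (n + 1) else x

-- Pre_ excludes exactly the inputs where the Python A raises IndexError: an element of B or A
-- outside the valid (possibly negative) index range of counts, or an element of A whose count
-- reaches len(is_prime) = 2 + max(n-1,0), so that is_prime[counts[a]] is out of range.
def Pre_calculate (A : List Int) (B : List Int) (n : Int) : Prop :=
  (∀ b ∈ B, -(n + 1) ≤ b ∧ b < n + 1) ∧
  (∀ a ∈ A, (-(n + 1) ≤ a ∧ a < n + 1) ∧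
    ((B.countP (fun b => pvSlot n b == pvSlot n a) : Int) < 2 + max (n - 1) 0))
instance (A : List Int) (B : List Int) (n : Int) : Decidable (Pre_calculate A B n) := by
  unfold Pre_calculate; infer_instance

def pvWitness_calculate : List Int × List Int × Int := ([0, 2, 5, -1], [2, 2, 3, -6], 5)

def Spec_calculate (A : List Int) (B : List Int) (n : Int) (out : List Int) : Prop := out = calculate_alt A B n
instance (A : List Int) (B : List Int) (n : Int) (out : List Int) : Decidable (Spec_calculate A B n out) := by unfold Spec_calculate; infer_instance

-- ===== CLAIM (what is proved, stated in full; the proofs are below) =====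
def Claim_equal_calculate : Prop := ∀ (A : List Int) (B : List Int) (n : Int), Dom_calculate A B n → Pre_calculate A B n → Spec_calculate A B n (calculate A B n)

-- ===== LEMMAS AND PROOFS =====

-- "no divisor d with 2 ≤ d < P": what the sieve has established after processing 2,…,P-1
def Good (P j : Int) : Prop := 2 ≤ j ∧ ∀ d : Int, 2 ≤ d → d < P → d * d ≤ j → ¬ d ∣ j
-- trial-division primality
def GoodAll (j : Int) : Prop := 2 ≤ j ∧ ∀ d : Int, 2 ≤ d → d * d ≤ j → ¬ d ∣ j

theorem pyIdx?_inrange (len : Nat) (i : Int) (h1 : -(len : Int) ≤ i) (h2 : i < (len : Int)) :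
    PySem.List.pyIdx? len i = some (if i < 0 then i + len else i).toNat := by
  simp only [PySem.List.pyIdx?]
  split_ifs <;> first | rfl | (simp only [Option.some.injEq]; omega) | omega

theorem pyGetD_inrange {α : Type} [Inhabited α] (xs : List α) (i : Int) (d : α)
    (h1 : -(xs.length : Int) ≤ i) (h2 : i < (xs.length : Int)) :
    PySem.List.pyGetD xs i d = xs[(if i < 0 then i + xs.length else i).toNat]! := by
  have hk : (if i < 0 then i + xs.length else i).toNat < xs.length := by
    split_ifs <;> omega
  simp only [PySem.List.pyGetD, PySem.List.pyGet?, pyIdx?_inrange xs.length i h1 h2,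
    Option.bind_some, List.getElem?_eq_getElem hk, Option.getD_some]
  rw [getElem!_pos xs _ hk]

theorem pySetD_inrange {α : Type} (xs : List α) (i : Int) (v : α)
    (h1 : -(xs.length : Int) ≤ i) (h2 : i < (xs.length : Int)) :
    PySem.List.pySetD xs i v = xs.set (if i < 0 then i + xs.length else i).toNat v := by
  simp only [PySem.List.pySetD, PySem.List.pySet?, pyIdx?_inrange xs.length i h1 h2,
    Option.map_some, Option.getD_some]

theorem pyGetD_wrap {α : Type} [Inhabited α] (xs : List α) (i : Int) (d : α)
    (h1 : -(xs.length : Int) ≤ i) (h2 : i < (xs.length : Int)) :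
    PySem.List.pyGetD xs i d = PySem.List.pyGetD xs (if i < 0 then i + xs.length else i) d := by
  by_cases hneg : i < 0
  · rw [if_pos hneg, pyGetD_inrange xs i d h1 h2,
      pyGetD_inrange xs (i + xs.length) d (by omega) (by omega)]
    congr 1
    split_ifs <;> omega
  · rw [if_neg hneg]

theorem pyGetD_pySetD_inrange {α : Type} [Inhabited α] (xs : List α) (i j : Int) (v d : α)
    (h1 : -(xs.length : Int) ≤ i) (h2 : i < (xs.length : Int))
    (hj0 : 0 ≤ j) (hj : j < (xs.length : Int)) :
    PySem.List.pyGetD (PySem.List.pySetD xs i v) j d =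
      if (if i < 0 then i + xs.length else i) = j then v else PySem.List.pyGetD xs j d := by
  have he : 0 ≤ (if i < 0 then i + (xs.length : Int) else i) ∧
      (if i < 0 then i + (xs.length : Int) else i) < xs.length := by split_ifs <;> omega
  rw [pySetD_inrange xs i v h1 h2]
  set e : Int := if i < 0 then i + (xs.length : Int) else i with hee
  rw [pyGetD_inrange _ j d (by simp; omega) (by simp; omega)]
  simp only [List.length_set]
  rw [pyGetD_inrange xs j d (by omega) hj]
  rw [if_neg (by omega : ¬ j < 0)]
  rw [getElem!_pos _ _ (by simp; omega), getElem!_pos xs _ (by omega), List.getElem_set]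
  by_cases hc : e = j
  · rw [if_pos (by omega : e.toNat = j.toNat), if_pos hc]
  · rw [if_neg (by omega : ¬ e.toNat = j.toNat), if_neg hc]

theorem pyGetD_replicate_zero (m : Nat) (j : Int) (hj0 : 0 ≤ j) (hj : j < (m : Int)) :
    PySem.List.pyGetD (List.replicate m (0 : Int)) j 0 = 0 := by
  rw [pyGetD_inrange _ j 0 (by simp; omega) (by simp; omega)]
  rw [if_neg (by omega : ¬ j < 0), getElem!_pos _ _ (by simp; omega), List.getElem_replicate]

theorem length_buildCounts (B : List Int) (cs : List Int) :
    (buildCounts B cs).length = cs.length := by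
  induction B generalizing cs with
  | nil => rfl
  | cons b B ih =>
    simp only [buildCounts, List.foldl_cons] at *
    rw [ih, PySem.List.length_pySetD]

theorem buildCounts_pyGetD (B : List Int) (cs : List Int)
    (hB : ∀ b ∈ B, -(cs.length : Int) ≤ b ∧ b < (cs.length : Int))
    (j : Int) (hj0 : 0 ≤ j) (hj : j < (cs.length : Int)) :
    PySem.List.pyGetD (buildCounts B cs) j 0 =
      PySem.List.pyGetD cs j 0 +
        (B.countP (fun b => (if b < 0 then b + (cs.length : Int) else b) == j) : Int) := by
  induction B generalizing cs with
  | nil => simp [buildCounts]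
  | cons b B ih =>
    obtain ⟨hb1, hb2⟩ := hB b (List.mem_cons_self ..)
    have hlen : (PySem.List.pySetD cs b (PySem.List.pyGetD cs b 0 + 1)).length = cs.length :=
      PySem.List.length_pySetD ..
    have hstep : buildCounts (b :: B) cs
        = buildCounts B (PySem.List.pySetD cs b (PySem.List.pyGetD cs b 0 + 1)) := rfl
    rw [hstep, ih _ (by rw [hlen]; exact fun x hx => hB x (List.mem_cons_of_mem _ hx)) (by rw [hlen]; exact hj),
      hlen]
    rw [pyGetD_pySetD_inrange cs b j _ 0 hb1 hb2 hj0 hj]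
    rw [List.countP_cons]
    have hwrap := pyGetD_wrap cs b (0 : Int) hb1 hb2
    by_cases hc : (if b < 0 then b + (cs.length : Int) else b) = j
    · rw [if_pos hc]
      rw [hc] at hwrap
      rw [hwrap]
      simp only [hc, beq_self_eq_true, if_pos]
      push_cast
      ring
    · rw [if_neg hc]
      have hfb : ((if b < 0 then b + (cs.length : Int) else b) == j) = false := by
        simp [hc]
      rw [hfb]
      push_cast
      ring

theorem length_foldl_setFalse (l : List Int) (t : List Bool) :
    (l.foldl (fun t i => PySem.List.pySetD t i false) t).length = t.length := by
  induction l generalizing t with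
  | nil => rfl
  | cons i l ih => simp only [List.foldl_cons]; rw [ih, PySem.List.length_pySetD]

theorem foldl_setFalse_pyGetD (l : List Int) (t : List Bool)
    (hl : ∀ i ∈ l, 0 ≤ i ∧ i < (t.length : Int))
    (j : Int) (hj0 : 0 ≤ j) (hj : j < (t.length : Int)) :
    PySem.List.pyGetD (l.foldl (fun t i => PySem.List.pySetD t i false) t) j false =
      if j ∈ l then false else PySem.List.pyGetD t j false := by
  induction l generalizing t with
  | nil => simp
  | cons i l ih =>
    obtain ⟨hi0, hilt⟩ := hl i (List.mem_cons_self ..)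
    have hlen : (PySem.List.pySetD t i false).length = t.length := PySem.List.length_pySetD ..
    simp only [List.foldl_cons]
    rw [ih _ (by rw [hlen]; exact fun x hx => hl x (List.mem_cons_of_mem _ hx)) (by rw [hlen]; exact hj)]
    rw [pyGetD_pySetD_inrange t i j false false (by omega) hilt hj0 hj]
    rw [if_neg (by omega : ¬ i < 0)]
    simp only [List.mem_cons]
    by_cases hjl : j ∈ l
    · simp [hjl]
    · by_cases hij : i = j
      · simp [hij]
      · simp [hjl, hij, Ne.symm hij]

theorem length_markMultiples (n p : Int) (t : List Bool) :
    (markMultiples n p t).length = t.length := length_foldl_setFalse ..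

theorem markMultiples_pyGetD (n p : Int) (hp : 0 < p) (t : List Bool)
    (hlen : (t.length : Int) = n + 1) (j : Int) (hj0 : 0 ≤ j) (hj : j < n + 1) :
    PySem.List.pyGetD (markMultiples n p t) j false =
      if p * p ≤ j ∧ p ∣ j then false else PySem.List.pyGetD t j false := by
  have hpp : p ∣ p * p := Dvd.intro p rfl
  have hmem : ∀ x : Int, x ∈ PySem.List.pyRange (p * p) (n + 1) p ↔ p * p ≤ x ∧ x < n + 1 ∧ p ∣ x - p * p :=
    PySem.List.mem_pyRange_iff_of_pos hp
  have hiff : (j ∈ PySem.List.pyRange (p * p) (n + 1) p) ↔ (p * p ≤ j ∧ p ∣ j) := by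
    rw [hmem j]
    constructor
    · rintro ⟨hx1, _, hx3⟩
      refine ⟨hx1, ?_⟩
      have := dvd_add hx3 hpp
      simpa using this
    · rintro ⟨hx1, hx2⟩
      exact ⟨hx1, hj, dvd_sub hx2 hpp⟩
  unfold markMultiples
  rw [foldl_setFalse_pyGetD _ t
    (fun i hi => by
      obtain ⟨hh1, hh2, _⟩ := (hmem i).mp hi
      refine ⟨by nlinarith, by omega⟩)
    j hj0 (by omega)]
  rw [if_congr hiff rfl rfl]

theorem init_getElem (m i : Nat) (h : i < (false :: false :: List.replicate m true).length) :
    (false :: false :: List.replicate m true)[i] = decide (2 ≤ i) := by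
  rcases i with _ | i
  · rfl
  · rcases i with _ | t
    · rfl
    · simp only [List.getElem_cons_succ]
      rw [List.getElem_replicate, eq_comm, decide_eq_true_eq]
      omega

theorem good_terminal (n p : Int) (hp : 2 ≤ p) (hnp : ¬ p * p ≤ n)
    (j : Int) (hj0 : 0 ≤ j) (hj : j < 2 + max (n - 1) 0) : Good p j ↔ GoodAll j := by
  unfold Good GoodAll
  constructor
  · rintro ⟨h2, hall⟩
    refine ⟨h2, fun d hd2 hdd hdvd => ?_⟩
    by_cases hdlt : d < p
    · exact hall d hd2 hdlt hdd hdvd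
    · have hjn : j ≤ n := by omega
      nlinarith
  · rintro ⟨h2, hall⟩
    exact ⟨h2, fun d hd2 _ hdd hdvd => hall d hd2 hdd hdvd⟩

theorem sieve_aux (n : Int) : ∀ (fuel : Nat) (p : Int) (ip : List Bool),
    (n + 1 - p).toNat ≤ fuel → 2 ≤ p → ((ip.length : Int) = 2 + max (n - 1) 0) →
    (∀ j : Int, 0 ≤ j → j < (ip.length : Int) → (PySem.List.pyGetD ip j false = true ↔ Good p j)) →
    ∀ j : Int, 0 ≤ j → j < (ip.length : Int) →
      (PySem.List.pyGetD (sieveLoop fuel n ip p) j false = true ↔ GoodAll j) := by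
  intro fuel
  induction fuel with
  | zero =>
    intro p ip hfuel hp hL hinv j hj0 hj
    have hpp : p ≤ p * p := by nlinarith
    have hterm : ¬ (p * p ≤ n) := by omega
    rw [sieveLoop, hinv j hj0 hj]
    exact good_terminal n p hp hterm j hj0 (by omega)
  | succ f ih =>
    intro p ip hfuel hp hL hinv j hj0 hj
    rw [sieveLoop]
    by_cases hcond : p * p ≤ n
    · rw [if_pos hcond]
      have hpn : p ≤ n := by nlinarith
      have hn4 : 4 ≤ n := by nlinarith
      have hLn : (ip.length : Int) = n + 1 := by omega
      have hplen : p < (ip.length : Int) := by omega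
      by_cases hgv : PySem.List.pyGetD ip p false = true
      · rw [if_pos hgv]
        refine ih (p + 1) (markMultiples n p ip) (by omega) (by omega)
          (by rw [length_markMultiples]; exact hL) ?_ j hj0
          (by rw [length_markMultiples]; exact hj)
        intro j' hj0' hjlt'
        rw [length_markMultiples] at hjlt'
        rw [markMultiples_pyGetD n p (by omega) ip hLn j' hj0' (by omega)]
        by_cases hcnd : p * p ≤ j' ∧ p ∣ j'
        · rw [if_pos hcnd]
          simp only [Bool.false_eq_true, false_iff]
          rintro ⟨h2j, hall⟩
          exact hall p hp (by omega) hcnd.1 hcnd.2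
        · rw [if_neg hcnd, hinv j' hj0' (by omega)]
          unfold Good
          constructor
          · rintro ⟨h2, hd⟩
            refine ⟨h2, fun d hd2 hdlt hdd hdvd => ?_⟩
            by_cases hdp : d = p
            · subst hdp
              exact hcnd ⟨hdd, hdvd⟩
            · exact hd d hd2 (by omega) hdd hdvd
          · rintro ⟨h2, hd⟩
            exact ⟨h2, fun d hd2 hdlt hdd hdvd => hd d hd2 (by omega) hdd hdvd⟩
      · rw [if_neg hgv]
        have hnotgood : ¬ Good p p := by
          rw [← hinv p (by omega) hplen]
          exact hgv
        have hex : ∃ d : Int, 2 ≤ d ∧ d < p ∧ d * d ≤ p ∧ d ∣ p := by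
          unfold Good at hnotgood
          push_neg at hnotgood
          obtain ⟨d, hd1, hd2, hd3, hd4⟩ := hnotgood hp
          exact ⟨d, hd1, hd2, hd3, hd4⟩
        obtain ⟨d0, hd02, hd0lt, hd0sq, hd0dvd⟩ := hex
        refine ih (p + 1) ip (by omega) (by omega) hL ?_ j hj0 hj
        intro j' hj0' hjlt'
        rw [hinv j' hj0' hjlt']
        unfold Good
        constructor
        · rintro ⟨h2, hall⟩
          refine ⟨h2, fun d hd2 hdlt hdd hdvd => ?_⟩
          by_cases hdp : d = p
          · subst hdp
            exact hall d0 hd02 hd0lt (by nlinarith) (hd0dvd.trans hdvd)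
          · exact hall d hd2 (by omega) hdd hdvd
        · rintro ⟨h2, hall⟩
          exact ⟨h2, fun d hd2 hdlt hdd hdvd => hall d hd2 (by omega) hdd hdvd⟩
    · rw [if_neg hcond, hinv j hj0 hj]
      exact good_terminal n p hp hcond j hj0 (by omega)

theorem tdLoop_iff : ∀ (fuel : Nat) (k d : Int), (k + 1 - d).toNat ≤ fuel → 2 ≤ d →
    (tdLoop fuel k d = true ↔ ∀ c : Int, d ≤ c → c * c ≤ k → ¬ c ∣ k) := by
  intro fuel
  induction fuel with
  | zero =>
    intro k d hfuel hd
    rw [tdLoop]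
    constructor
    · intro _ c hc hcc hdvd
      have hkd : k < d := by omega
      nlinarith
    · intro _
      rfl
  | succ f ih =>
    intro k d hfuel hd
    rw [tdLoop]
    by_cases hdk : d * d ≤ k
    · rw [if_pos hdk]
      have hdlek : d ≤ k := by nlinarith
      by_cases hmod : k % d = 0
      · rw [if_pos hmod]
        have hdvd : d ∣ k := Int.dvd_of_emod_eq_zero hmod
        simp only [Bool.false_eq_true, false_iff]
        push_neg
        exact ⟨d, le_rfl, hdk, hdvd⟩
      · rw [if_neg hmod]
        rw [ih k (d + 1) (by omega) (by omega)]
        have hndvd : ¬ d ∣ k := fun h => hmod (Int.emod_eq_zero_of_dvd h)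
        constructor
        · intro hall c hc hcc hdvd
          rcases eq_or_lt_of_le hc with heq | hlt
          · exact hndvd (heq ▸ hdvd)
          · exact hall c (by omega) hcc hdvd
        · intro hall c hc hcc hdvd
          exact hall c (by omega) hcc hdvd
    · rw [if_neg hdk]
      constructor
      · intro _ c hc hcc hdvd
        nlinarith
      · intro _
        rfl

theorem isPrimeTD_iff (k : Int) : isPrimeTD k = true ↔ GoodAll k := by
  unfold isPrimeTD GoodAll
  by_cases h2 : k < 2
  · rw [if_pos h2]
    simp only [Bool.false_eq_true, false_iff]
    rintro ⟨hk, _⟩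
    omega
  · rw [if_neg h2]
    rw [tdLoop_iff (k - 1).toNat k 2 (by omega) le_rfl]
    constructor
    · intro h
      exact ⟨by omega, h⟩
    · rintro ⟨_, h⟩
      exact h

-- the two filter predicates coincide on every admitted a
theorem pred_eq (B : List Int) (n : Int) (a : Int)
    (hB : ∀ b ∈ B, -(n + 1) ≤ b ∧ b < n + 1)
    (ha1 : -(n + 1) ≤ a) (ha2 : a < n + 1)
    (hcnt : ((B.countP (fun b => pvSlot n b == pvSlot n a) : Nat) : Int) < 2 + max (n - 1) 0) :
    PySem.List.pyGetD (sieveLoop (n - 1).toNat n ([false, false] ++ List.replicate (n - 1).toNat true) 2)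
        (PySem.List.pyGetD (buildCounts B (List.replicate (n + 1).toNat 0)) a 0) false
      = isPrimeTD (PySem.List.pyGetD (buildCounts B (List.replicate (n + 1).toNat 0)) a 0) := by
  have hn0 : 0 ≤ n := by omega
  have hmcs : ((List.replicate (n + 1).toNat (0 : Int)).length : Int) = n + 1 := by
    simp only [List.length_replicate]
    omega
  have hslot : 0 ≤ pvSlot n a ∧ pvSlot n a < n + 1 := by
    unfold pvSlot
    split_ifs <;> omega
  have hlbc : ((buildCounts B (List.replicate (n + 1).toNat 0)).length : Int) = n + 1 := by
    rw [length_buildCounts]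
    exact hmcs
  -- the looked-up count is exactly the Pre_'s countP
  have hk : PySem.List.pyGetD (buildCounts B (List.replicate (n + 1).toNat 0)) a 0
      = ((B.countP (fun b => pvSlot n b == pvSlot n a) : Nat) : Int) := by
    rw [pyGetD_wrap _ a 0 (by omega) (by omega)]
    rw [hlbc]
    have hsa : (if a < 0 then a + (n + 1) else a) = pvSlot n a := rfl
    rw [hsa]
    rw [buildCounts_pyGetD B _ (fun b hb => by rw [hmcs]; exact hB b hb) _ hslot.1 (by rw [hmcs]; exact hslot.2)]
    rw [pyGetD_replicate_zero _ _ hslot.1 (by omega), zero_add]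
    congr 1
    apply List.countP_congr
    intro b hb
    rw [hmcs]
    rfl
  rw [hk]
  set c : Int := ((B.countP (fun b => pvSlot n b == pvSlot n a) : Nat) : Int) with hc
  have hc0 : 0 ≤ c := by positivity
  have hlip : (((([false, false] ++ List.replicate (n - 1).toNat true) : List Bool)).length : Int)
      = 2 + max (n - 1) 0 := by
    simp only [List.length_append, List.length_cons, List.length_nil, List.length_replicate]
    omega
  -- initial sieve table: true exactly from index 2 on
  have hinv : ∀ j : Int, 0 ≤ j →
      j < ((([false, false] ++ List.replicate (n - 1).toNat true) : List Bool).length : Int) →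
      (PySem.List.pyGetD (([false, false] ++ List.replicate (n - 1).toNat true) : List Bool) j false = true
        ↔ Good 2 j) := by
    intro j hj0 hjlt
    have hlen2 : (([false, false] ++ List.replicate (n - 1).toNat true) : List Bool).length
        = 2 + (n - 1).toNat := by
      simp only [List.length_append, List.length_cons, List.length_nil, List.length_replicate]
    rw [hlen2] at hjlt
    rw [pyGetD_inrange _ j false (by rw [hlen2]; omega) (by rw [hlen2]; omega)]
    rw [if_neg (by omega : ¬ j < 0)]
    have hcons : (([false, false] ++ List.replicate (n - 1).toNat true) : List Bool)
        = false :: false :: List.replicate (n - 1).toNat true := rfl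
    rw [hcons]
    rw [getElem!_pos _ _ (by simp only [List.length_cons, List.length_replicate]; omega)]
    rw [init_getElem (n - 1).toNat j.toNat _]
    simp only [decide_eq_true_eq]
    unfold Good
    constructor
    · intro h
      exact ⟨by omega, fun d hd1 hd2 _ _ => by omega⟩
    · rintro ⟨h, _⟩
      omega
  have hsieve := sieve_aux n (n - 1).toNat 2 ([false, false] ++ List.replicate (n - 1).toNat true)
    (by omega) le_rfl hlip hinv c hc0 (by rw [hlip]; omega)
  have hiff : (PySem.List.pyGetD (sieveLoop (n - 1).toNat n ([false, false] ++ List.replicate (n - 1).toNat true) 2) c false = true)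
      ↔ (isPrimeTD c = true) := hsieve.trans (isPrimeTD_iff c).symm
  cases hx : PySem.List.pyGetD (sieveLoop (n - 1).toNat n ([false, false] ++ List.replicate (n - 1).toNat true) 2) c false
  · cases hy : isPrimeTD c
    · rfl
    · have hcontra := hiff.mpr hy
      rw [hx] at hcontra
      exact absurd hcontra Bool.false_ne_true
  · cases hy : isPrimeTD c
    · have hcontra := hiff.mp hx
      rw [hy] at hcontra
      exact absurd hcontra Bool.false_ne_true
    · rfl

-- ===== VERDICT (by name: the statement is the Claim_ definition above) =====
theorem calculate_spec : Claim_equal_calculate := by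
  intro A B n _ hpre
  unfold Spec_calculate calculate calculate_alt
  obtain ⟨hB, hA⟩ := hpre
  apply List.filter_congr
  intro a ha
  obtain ⟨⟨ha1, ha2⟩, hcnt⟩ := hA a ha
  rw [pred_eq B n a hB ha1 ha2 hcnt]
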